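-- pv_equiv track=rewrite | github.com/fsubgh/PythonBasicsRepoAisina | home_work9.py | number_sequence
-- ===== SOURCE A (Python) =====
-- def number_sequence(start: int, end: int, even: bool = True):
--
--     if even:
--         current = start if start % 2 == 0 else start + 1
--         step = 2
--     else:
--         current = start if start % 2 != 0 else start + 1
--         step = 2
--
--     while current <= end:
--         yield current
--         current += step
-- ===== SOURCE B (Python) =====
-- def number_sequence(start: int, end: int, even: bool = True):
--     for i in range(start, end + 1):
--         if (i % 2 == 0) == even:
--             yield i
-- ===== Notes on version B (the rewrite author's own statement) =====
-- stated objective: simpler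
-- what changed: B drops A's parity-adjusted start and stride-2 while loop; it iterates the whole range(start, end+1) once and filters each element by parity, with no start adjustment or step state.
import Mathlib
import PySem

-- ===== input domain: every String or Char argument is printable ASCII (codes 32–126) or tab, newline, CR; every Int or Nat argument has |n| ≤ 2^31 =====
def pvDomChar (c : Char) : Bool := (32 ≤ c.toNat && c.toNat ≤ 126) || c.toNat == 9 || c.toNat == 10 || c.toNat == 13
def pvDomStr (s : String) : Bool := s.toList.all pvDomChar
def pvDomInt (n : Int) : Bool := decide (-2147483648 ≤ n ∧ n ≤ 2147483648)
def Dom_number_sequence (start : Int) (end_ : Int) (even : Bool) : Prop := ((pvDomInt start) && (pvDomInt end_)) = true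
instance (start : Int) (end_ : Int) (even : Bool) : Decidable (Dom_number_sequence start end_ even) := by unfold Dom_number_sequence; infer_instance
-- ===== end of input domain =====

-- B replaces A's parity-adjusted start and stride-2 while loop by a single pass over the
-- whole range that filters each element by parity (objective: simpler).
-- A is a Python generator; both ports return the list of all yielded values.

-- ===== PORT A =====
-- the 'while current <= end: yield current; current += step' loop of A, with step = 2
def nsLoop (current : Int) (end_ : Int) : List Int :=
  if current ≤ end_ then current :: nsLoop (current + 2) end_ else []
termination_by (end_ + 1 - current).toNat
decreasing_by omega

def number_sequence (start : Int) (end_ : Int) (even : Bool) : List Int :=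
  let current : Int :=
    if even then (if PySem.Int.mod start 2 == 0 then start else start + 1)
    else (if !(PySem.Int.mod start 2 == 0) then start else start + 1)
  nsLoop current end_

-- ===== PORT B =====
def number_sequence_alt (start : Int) (end_ : Int) (even : Bool) : List Int :=
  (PySem.List.pyRange start (end_ + 1) 1).filter
    (fun i => (PySem.Int.mod i 2 == 0) == even)

-- ===== PRECONDITION & SPEC =====
def Spec_number_sequence (start : Int) (end_ : Int) (even : Bool) (out : List Int) : Prop := out = number_sequence_alt start end_ even
instance (start : Int) (end_ : Int) (even : Bool) (out : List Int) : Decidable (Spec_number_sequence start end_ even out) := by unfold Spec_number_sequence; infer_instance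

-- ===== CLAIM (what is proved, stated in full; the proofs are below) =====
def Claim_equal_number_sequence : Prop := ∀ (start : Int) (end_ : Int) (even : Bool), Dom_number_sequence start end_ even → Spec_number_sequence start end_ even (number_sequence start end_ even)

-- ===== LEMMAS AND PROOFS =====

theorem ns_mod2 (i : Int) : PySem.Int.mod i 2 = i % 2 :=
  PySem.Int.mod_eq_emod_of_pos (by norm_num)

-- the parity predicate flips when the argument grows by one
theorem ns_flip (even : Bool) (c : Int) :
    ((PySem.Int.mod (c + 1) 2 == 0) == even) = !((PySem.Int.mod c 2 == 0) == even) := by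
  have h1 : PySem.Int.mod c 2 = c % 2 := ns_mod2 c
  have h2 : PySem.Int.mod (c + 1) 2 = (c + 1) % 2 := ns_mod2 _
  rcases Int.emod_two_eq_zero_or_one c with h | h <;>
    have h3 : (c + 1) % 2 = 1 - c % 2 := by omega
  all_goals cases even <;> simp [h, h3]

-- A's stride-2 loop started at a point of the right parity equals B's filtered range
theorem nsLoop_eq_filter (even : Bool) : ∀ (n : Nat) (c e : Int),
    (e + 1 - c).toNat ≤ n → ((PySem.Int.mod c 2 == 0) == even) = true →
    nsLoop c e = (PySem.List.pyRange c (e + 1) 1).filter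
      (fun i => (PySem.Int.mod i 2 == 0) == even) := by
  intro n
  induction n with
  | zero =>
    intro c e hn hp
    have hc : e < c := by omega
    rw [nsLoop, PySem.List.pyRange_one_eq_nil (by omega)]
    simp [show ¬ c ≤ e by omega]
  | succ n ih =>
    intro c e hn hp
    by_cases hc : c ≤ e
    · rw [nsLoop]
      simp only [if_pos hc]
      rw [PySem.List.pyRange_one_cons (by omega : c < e + 1)]
      rw [List.filter_cons_of_pos (by simp only [hp])]
      congr 1
      by_cases hc1 : c + 1 ≤ e
      · have hflip : ((PySem.Int.mod (c + 1) 2 == 0) == even) = false := by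
          rw [ns_flip, hp]; rfl
        rw [PySem.List.pyRange_one_cons (by omega : c + 1 < e + 1)]
        rw [List.filter_cons_of_neg (by simp only [hflip]; decide)]
        have hp2 : ((PySem.Int.mod (c + 2) 2 == 0) == even) = true := by
          have h2 := ns_flip even (c + 1)
          rw [show c + 1 + 1 = c + 2 by ring, hflip] at h2
          rw [h2]; rfl
        rw [show c + 1 + 1 = c + 2 by ring]
        exact ih (c + 2) e (by omega) hp2
      · rw [nsLoop, PySem.List.pyRange_one_eq_nil (by omega)]
        simp [show ¬ c + 2 ≤ e by omega]
    · rw [nsLoop, PySem.List.pyRange_one_eq_nil (by omega)]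
      simp [hc]

-- from a start of the wrong parity, starting at start+1 still equals B's filter from start
theorem nsLoop_succ_eq_filter (even : Bool) (start e : Int)
    (hp : ((PySem.Int.mod start 2 == 0) == even) = false) :
    nsLoop (start + 1) e = (PySem.List.pyRange start (e + 1) 1).filter
      (fun i => (PySem.Int.mod i 2 == 0) == even) := by
  have hp1 : ((PySem.Int.mod (start + 1) 2 == 0) == even) = true := by
    rw [ns_flip, hp]; rfl
  by_cases h : start < e + 1
  · rw [PySem.List.pyRange_one_cons h, List.filter_cons_of_neg (by simp only [hp]; decide)]
    exact nsLoop_eq_filter even _ (start + 1) e le_rfl hp1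
  · rw [nsLoop, PySem.List.pyRange_one_eq_nil (by omega)]
    simp [show ¬ start + 1 ≤ e by omega]

-- ===== VERDICT (by name: the statement is the Claim_ definition above) =====
theorem number_sequence_spec : Claim_equal_number_sequence := by
  intro start end_ even _
  unfold Spec_number_sequence number_sequence number_sequence_alt
  by_cases hp : ((PySem.Int.mod start 2 == 0) == even) = true
  · have hstart : (if even then (if PySem.Int.mod start 2 == 0 then start else start + 1)
        else (if !(PySem.Int.mod start 2 == 0) then start else start + 1)) = start := by
      cases even <;> cases h0 : (PySem.Int.mod start 2 == 0) <;> simp_all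
    simp only [hstart]
    exact nsLoop_eq_filter even _ start end_ le_rfl hp
  · have hp' : ((PySem.Int.mod start 2 == 0) == even) = false := by
      simpa using hp
    have hstart : (if even then (if PySem.Int.mod start 2 == 0 then start else start + 1)
        else (if !(PySem.Int.mod start 2 == 0) then start else start + 1)) = start + 1 := by
      cases even <;> cases h0 : (PySem.Int.mod start 2 == 0) <;> simp_all
    simp only [hstart]
    exact nsLoop_succ_eq_filter even start end_ hp'
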